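-- pv_equiv track=rewrite | github.com/Lnrchaos/Aegis | aegis/repl.py | _colorize_line
-- ===== SOURCE A (Python) =====
-- _CYBER_KEYWORDS = {
--     "override", "firewall", "tunnel", "keylogger", "generate", "hash", "encrypt", "decrypt",
--     "protect", "attack", "defend", "activate", "deactivate", "analyze", "contain", "payload",
--     "load", "manipulate", "inject", "read", "write", "save", "corrupt", "break", "pause",
--     "enter", "exit", "table", "brute", "trace", "monitor", "quarantine", "alert",
-- }
--
-- COLOR_SCHEME = {
--     "control": "\x1b[38;5;81m",      # Color A
--     "loop": "\x1b[38;5;135m",         # Color B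
--     "logical": "\x1b[38;5;178m",      # Color C
--     "cyber": "\x1b[38;5;203m",        # Color D
--     "number": "\x1b[38;5;71m",        # Color E
--     "symbol": "\x1b[38;5;244m",       # Color F
--     "reset": "\x1b[0m",
-- }
--
-- _CONTROL_FLOW_WORDS = {"if", "then", "else", "however", "unless", "yet"}
--
-- _LOOP_WORDS = {"while", "do", "when"}
--
-- _LOGICAL_WORDS = {"and", "or", "not", "nor", "as", "is", "for", "in"}
--
-- def _colorize_line(s: str) -> str:
--     # Split by quotes to avoid coloring inside strings
--     parts: list[str] = []
--     buf: list[str] = []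
--     in_quotes = False
--     for ch in s:
--         if ch == '"':
--             if buf:
--                 parts.append(_colorize_segment("".join(buf)))
--                 buf = []
--             parts.append('"')
--             in_quotes = not in_quotes
--             continue
--         if in_quotes:
--             parts.append(ch)
--             continue
--         buf.append(ch)
--     if buf:
--         parts.append(_colorize_segment("".join(buf)))
--     return "".join(parts)
--
-- def _colorize_segment(seg: str) -> str:
--     if not seg:
--         return seg
--     out: list[str] = []
--     i = 0
--     while i < len(seg):
--         ch = seg[i]
--         if ch.isalpha() or ch == "_":
--             j = i
--             while j < len(seg) and (seg[j].isalnum() or seg[j] == "_"):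
--                 j += 1
--             word = seg[i:j]
--             low = word.lower()
--             color = None
--             if low in _CYBER_KEYWORDS:
--                 color = COLOR_SCHEME["cyber"]
--             elif low in _CONTROL_FLOW_WORDS:
--                 color = COLOR_SCHEME["control"]
--             elif low in _LOOP_WORDS:
--                 color = COLOR_SCHEME["loop"]
--             elif low in _LOGICAL_WORDS:
--                 color = COLOR_SCHEME["logical"]
--             if color:
--                 out.append(f"{color}{word}{COLOR_SCHEME['reset']}")
--             else:
--                 out.append(word)
--             i = j
--             continue
--         if ch.isdigit():
--             j = i
--             has_dot = False
--             while j < len(seg) and (seg[j].isdigit() or (seg[j] == "." and not has_dot)):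
--                 if seg[j] == ".":
--                     has_dot = True
--                 j += 1
--             num = seg[i:j]
--             out.append(f"{COLOR_SCHEME['number']}{num}{COLOR_SCHEME['reset']}")
--             i = j
--             continue
--         if ch in "=+-*/(){}[]:;. ,":
--             out.append(f"{COLOR_SCHEME['symbol']}{ch}{COLOR_SCHEME['reset']}")
--             i += 1
--             continue
--         out.append(ch)
--         i += 1
--     return "".join(out)
-- ===== SOURCE B (Python) =====
-- _CYBER_KEYWORDS = {
--     "override", "firewall", "tunnel", "keylogger", "generate", "hash", "encrypt", "decrypt",
--     "protect", "attack", "defend", "activate", "deactivate", "analyze", "contain", "payload",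
--     "load", "manipulate", "inject", "read", "write", "save", "corrupt", "break", "pause",
--     "enter", "exit", "table", "brute", "trace", "monitor", "quarantine", "alert",
-- }
--
-- COLOR_SCHEME = {
--     "control": "\x1b[38;5;81m",
--     "loop": "\x1b[38;5;135m",
--     "logical": "\x1b[38;5;178m",
--     "cyber": "\x1b[38;5;203m",
--     "number": "\x1b[38;5;71m",
--     "symbol": "\x1b[38;5;244m",
--     "reset": "\x1b[0m",
-- }
--
-- _CONTROL_FLOW_WORDS = {"if", "then", "else", "however", "unless", "yet"}
-- _LOOP_WORDS = {"while", "do", "when"}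
-- _LOGICAL_WORDS = {"and", "or", "not", "nor", "as", "is", "for", "in"}
--
-- # one merged word -> color table, built once (priority cyber > control > loop > logical:
-- # later insertions overwrite; the four sets are in fact disjoint)
-- _WORD_COLORS = {}
-- for _w in _LOGICAL_WORDS:
--     _WORD_COLORS[_w] = COLOR_SCHEME["logical"]
-- for _w in _LOOP_WORDS:
--     _WORD_COLORS[_w] = COLOR_SCHEME["loop"]
-- for _w in _CONTROL_FLOW_WORDS:
--     _WORD_COLORS[_w] = COLOR_SCHEME["control"]
-- for _w in _CYBER_KEYWORDS:
--     _WORD_COLORS[_w] = COLOR_SCHEME["cyber"]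
--
-- _SYMBOLS = "=+-*/(){}[]:;. ,"
-- _RESET = COLOR_SCHEME["reset"]
--
--
-- def _tokenize(seg):
--     """One pass over seg producing (kind, text) tokens: word / number / symbol / raw."""
--     toks = []
--     i = 0
--     n = len(seg)
--     while i < n:
--         ch = seg[i]
--         if ch.isalpha() or ch == "_":
--             j = i + 1
--             while j < n and (seg[j].isalnum() or seg[j] == "_"):
--                 j += 1
--             toks.append(("word", seg[i:j]))
--             i = j
--         elif ch.isdigit():
--             j = i + 1
--             while j < n and seg[j].isdigit():
--                 j += 1
--             if j < n and seg[j] == ".":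
--                 j += 1
--                 while j < n and seg[j].isdigit():
--                     j += 1
--             toks.append(("number", seg[i:j]))
--             i = j
--         elif ch in _SYMBOLS:
--             toks.append(("symbol", ch))
--             i += 1
--         else:
--             toks.append(("raw", ch))
--             i += 1
--     return toks
--
--
-- def _render(kind, text):
--     if kind == "word":
--         color = _WORD_COLORS.get(text.lower())
--         return f"{color}{text}{_RESET}" if color else text
--     if kind == "number":
--         return f"{COLOR_SCHEME['number']}{text}{_RESET}"
--     if kind == "symbol":
--         return f"{COLOR_SCHEME['symbol']}{text}{_RESET}"
--     return text
--
--
-- def _colorize_segment_b(seg):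
--     return "".join(_render(k, t) for k, t in _tokenize(seg))
--
--
-- def _colorize_line(s):
--     pieces = s.split('"')
--     return '"'.join(p if i % 2 else _colorize_segment_b(p) for i, p in enumerate(pieces))
-- ===== Notes on version B (the rewrite author's own statement) =====
-- stated objective: alternative
-- what changed: B splits the line at double-quote characters and colorizes the even-index pieces (replacing A's char-by-char quote-toggle loop), and colorizes a segment in two passes - a tokenizer producing (kind,text) tokens with a digits-dot-digits number scan, then a renderer using one merged word-to-color dict instead of A's four chained set tests.
import Mathlib
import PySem

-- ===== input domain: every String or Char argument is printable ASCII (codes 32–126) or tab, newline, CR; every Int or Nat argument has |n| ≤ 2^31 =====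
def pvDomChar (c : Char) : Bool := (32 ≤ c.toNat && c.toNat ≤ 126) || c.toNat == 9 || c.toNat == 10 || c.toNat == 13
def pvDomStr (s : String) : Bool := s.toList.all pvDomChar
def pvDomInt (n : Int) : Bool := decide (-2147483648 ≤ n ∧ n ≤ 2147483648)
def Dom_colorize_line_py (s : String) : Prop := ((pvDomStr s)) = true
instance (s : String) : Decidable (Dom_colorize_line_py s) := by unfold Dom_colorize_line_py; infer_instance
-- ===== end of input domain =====

-- B replaces A's char-by-char quote-toggle and single-pass colorizer by split-on-'"' plus a
-- tokenize/render two-pass segment colorizer with one merged word->color dict; return values equal.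

-- ===== PORT A =====
-- shared literal constants (the module-level sets and COLOR_SCHEME of the Python file)
def kwCyber : List (List Char) :=
  ["override", "firewall", "tunnel", "keylogger", "generate", "hash", "encrypt", "decrypt",
   "protect", "attack", "defend", "activate", "deactivate", "analyze", "contain", "payload",
   "load", "manipulate", "inject", "read", "write", "save", "corrupt", "break", "pause",
   "enter", "exit", "table", "brute", "trace", "monitor", "quarantine", "alert"].map String.toList

def kwControl : List (List Char) :=
  ["if", "then", "else", "however", "unless", "yet"].map String.toList

def kwLoop : List (List Char) := ["while", "do", "when"].map String.toList

def kwLogical : List (List Char) :=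
  ["and", "or", "not", "nor", "as", "is", "for", "in"].map String.toList

def colControl : List Char := "\x1b[38;5;81m".toList
def colLoop : List Char := "\x1b[38;5;135m".toList
def colLogical : List Char := "\x1b[38;5;178m".toList
def colCyber : List Char := "\x1b[38;5;203m".toList
def colNumber : List Char := "\x1b[38;5;71m".toList
def colSymbol : List Char := "\x1b[38;5;244m".toList
def colReset : List Char := "\x1b[0m".toList

def symChars : List Char := "=+-*/(){}[]:;. ,".toList

-- A's inner word scan 'while j < len(seg) and (seg[j].isalnum() or seg[j] == "_")'
def spanWordA : List Char → List Char × List Char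
  | [] => ([], [])
  | c :: t =>
    if PySem.Chars.isalnum c || c = '_' then
      let p := spanWordA t; (c :: p.1, p.2)
    else ([], c :: t)

-- A's inner number scan with its has_dot flag
def spanNumA : Bool → List Char → List Char × List Char
  | _, [] => ([], [])
  | hasDot, c :: t =>
    if PySem.Chars.isdigit c then let p := spanNumA hasDot t; (c :: p.1, p.2)
    else if c = '.' ∧ ¬hasDot then let p := spanNumA true t; (c :: p.1, p.2)
    else ([], c :: t)

theorem spanWordA_snd_len (l : List Char) : (spanWordA l).2.length ≤ l.length := by
  induction l with
  | nil => simp [spanWordA]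
  | cons c t ih =>
    simp only [spanWordA]
    split
    · simpa using Nat.le_succ_of_le ih
    · simp

theorem spanNumA_snd_len (hd : Bool) (l : List Char) : (spanNumA hd l).2.length ≤ l.length := by
  induction l generalizing hd with
  | nil => simp [spanNumA]
  | cons c t ih =>
    simp only [spanNumA]
    split
    · simpa using Nat.le_succ_of_le (ih hd)
    · split
      · simpa using Nat.le_succ_of_le (ih true)
      · simp

-- A's 'low in SET …' chain and the f-string wrap
def wordColorA (word : List Char) : List Char :=
  let low := PySem.Chars.lower word
  let color : Option (List Char) :=
    if low ∈ kwCyber then some colCyber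
    else if low ∈ kwControl then some colControl
    else if low ∈ kwLoop then some colLoop
    else if low ∈ kwLogical then some colLogical
    else none
  match color with
  | some c => c ++ word ++ colReset
  | none => word

-- _colorize_segment: the while-i loop over the segment
def segA : List Char → List Char
  | [] => []
  | c :: t =>
    if PySem.Chars.isalpha c || c = '_' then
      let p := spanWordA t
      wordColorA (c :: p.1) ++ segA p.2
    else if PySem.Chars.isdigit c then
      let p := spanNumA false t
      (colNumber ++ (c :: p.1) ++ colReset) ++ segA p.2
    else if c ∈ symChars then
      (colSymbol ++ [c] ++ colReset) ++ segA t
    else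
      c :: segA t
termination_by l => l.length
decreasing_by
  · exact Nat.lt_succ_of_le (spanWordA_snd_len t)
  · exact Nat.lt_succ_of_le (spanNumA_snd_len false t)
  · exact Nat.lt_succ_of_le (Nat.le_refl _)
  · exact Nat.lt_succ_of_le (Nat.le_refl _)

-- _colorize_line's for-loop over characters with parts/buf/in_quotes
def lineA : List Char → List (List Char) → List Char → Bool → List (List Char)
  | [], parts, buf, _ => if buf.isEmpty then parts else parts ++ [segA buf]
  | c :: t, parts, buf, inq =>
    if c = '"' then
      lineA t ((if buf.isEmpty then parts else parts ++ [segA buf]) ++ [['"']]) [] (!inq)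
    else if inq then
      lineA t (parts ++ [[c]]) buf inq
    else
      lineA t parts (buf ++ [c]) inq

def colorize_line_py (s : String) : String :=
  String.ofList (lineA s.toList [] [] false).flatten

-- ===== PORT B =====
def isWordCharB (c : Char) : Bool := PySem.Chars.isalnum c || c = '_'

-- the merged word -> color dict of Source B, built by the four module-level loops
def wordColorsB : PySem.Dict (List Char) (List Char) :=
  let d := kwLogical.foldl (fun d w => d.insert w colLogical) PySem.Dict.empty
  let d := kwLoop.foldl (fun d w => d.insert w colLoop) d
  let d := kwControl.foldl (fun d w => d.insert w colControl) d
  kwCyber.foldl (fun d w => d.insert w colCyber) d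

-- Source B's _tokenize: one pass producing (kind, text) tokens
def tokenizeB : List Char → List (String × List Char)
  | [] => []
  | c :: t =>
    if PySem.Chars.isalpha c || c = '_' then
      ("word", c :: t.takeWhile isWordCharB) :: tokenizeB (t.dropWhile isWordCharB)
    else if PySem.Chars.isdigit c then
      match h : t.dropWhile PySem.Chars.isdigit with
      | '.' :: r2 =>
        ("number", (c :: t.takeWhile PySem.Chars.isdigit) ++ '.' :: r2.takeWhile PySem.Chars.isdigit)
          :: tokenizeB (r2.dropWhile PySem.Chars.isdigit)
      | _ => ("number", c :: t.takeWhile PySem.Chars.isdigit) :: tokenizeB (t.dropWhile PySem.Chars.isdigit)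
    else if c ∈ symChars then
      ("symbol", [c]) :: tokenizeB t
    else
      ("raw", [c]) :: tokenizeB t
termination_by l => l.length
decreasing_by
  · exact Nat.lt_succ_of_le (List.length_dropWhile_le _ t)
  · have h1 : r2.length + 1 ≤ t.length := by
      have h3 := List.length_dropWhile_le PySem.Chars.isdigit t
      rw [h] at h3; simpa using h3
    have h2 := List.length_dropWhile_le PySem.Chars.isdigit r2
    simp only [List.length_cons]; omega
  · exact Nat.lt_succ_of_le (List.length_dropWhile_le _ t)
  · exact Nat.lt_succ_of_le (Nat.le_refl _)
  · exact Nat.lt_succ_of_le (Nat.le_refl _)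

-- Source B's _render
def renderB : String × List Char → List Char
  | (k, text) =>
    if k = "word" then
      match PySem.Dict.get? wordColorsB (PySem.Chars.lower text) with
      | some col => col ++ text ++ colReset
      | none => text
    else if k = "number" then colNumber ++ text ++ colReset
    else if k = "symbol" then colSymbol ++ text ++ colReset
    else text

-- Source B's _colorize_segment_b: join of the rendered tokens
def segB (l : List Char) : List Char := (tokenizeB l).flatMap renderB

-- Source B's _colorize_line: split on '"', colorize even-index pieces, rejoin
def colorize_line_py_alt (s : String) : String :=
  let pieces := PySem.Chars.splitOn s.toList ['"']
  String.ofList (PySem.Chars.join ['"']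
    ((PySem.List.enumerate pieces).map
      (fun ip => if PySem.Int.mod ip.1 2 = 0 then segB ip.2 else ip.2)))

-- ===== PRECONDITION & SPEC =====
def Spec_colorize_line_py (s : String) (out : String) : Prop := out = colorize_line_py_alt s
instance (s : String) (out : String) : Decidable (Spec_colorize_line_py s out) := by unfold Spec_colorize_line_py; infer_instance

-- ===== CLAIM (what is proved, stated in full; the proofs are below) =====
def Claim_equal_colorize_line_py : Prop := ∀ (s : String), Dom_colorize_line_py s → Spec_colorize_line_py s (colorize_line_py s)

-- ===== LEMMAS AND PROOFS =====

theorem spanWordA_eq (l : List Char) :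
    spanWordA l = (l.takeWhile isWordCharB, l.dropWhile isWordCharB) := by
  induction l with
  | nil => simp [spanWordA]
  | cons c t ih =>
    by_cases hw : PySem.Chars.isalnum c = true ∨ c = '_'
    · have hb : isWordCharB c = true := by
        unfold isWordCharB; rcases hw with h | h <;> simp [h]
      simp [spanWordA, if_pos hw, List.takeWhile_cons_of_pos hb,
        List.dropWhile_cons_of_pos hb, ih]
    · have hb : ¬ isWordCharB c = true := by
        simpa [isWordCharB] using hw
      simp [spanWordA, if_neg hw, List.takeWhile_cons_of_neg hb, List.dropWhile_cons_of_neg hb]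

theorem spanNumA_true (l : List Char) :
    spanNumA true l = (l.takeWhile PySem.Chars.isdigit, l.dropWhile PySem.Chars.isdigit) := by
  induction l with
  | nil => simp [spanNumA]
  | cons c t ih =>
    simp only [spanNumA, List.takeWhile, List.dropWhile]
    by_cases hd : PySem.Chars.isdigit c <;> simp_all

theorem spanNumA_false_dot (l r2 : List Char)
    (h : l.dropWhile PySem.Chars.isdigit = '.' :: r2) :
    spanNumA false l =
      (l.takeWhile PySem.Chars.isdigit ++ '.' :: r2.takeWhile PySem.Chars.isdigit,
       r2.dropWhile PySem.Chars.isdigit) := by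
  induction l with
  | nil => simp at h
  | cons c t ih =>
    by_cases hd : PySem.Chars.isdigit c
    · rw [List.dropWhile_cons_of_pos hd] at h
      simp [spanNumA, hd, List.takeWhile_cons_of_pos hd, ih h]
    · have hcons : c :: t = '.' :: r2 := by
        rwa [List.dropWhile_cons_of_neg (by simp [hd])] at h
      injection hcons with hc ht
      subst hc; subst ht
      simp [spanNumA, hd, spanNumA_true, List.takeWhile_cons_of_neg hd]

theorem spanNumA_false_nodot (l : List Char)
    (h : ∀ r2, l.dropWhile PySem.Chars.isdigit ≠ '.' :: r2) :
    spanNumA false l = (l.takeWhile PySem.Chars.isdigit, l.dropWhile PySem.Chars.isdigit) := by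
  induction l with
  | nil => simp [spanNumA]
  | cons c t ih =>
    by_cases hd : PySem.Chars.isdigit c
    · rw [List.dropWhile_cons_of_pos hd] at h
      simp [spanNumA, hd, List.takeWhile_cons_of_pos hd, List.dropWhile_cons_of_pos hd, ih h]
    · rw [List.dropWhile_cons_of_neg (by simp [hd])] at h
      have hc : c ≠ '.' := by
        intro hc
        exact h t (by simp [hc])
      simp [spanNumA, hd, hc, List.takeWhile_cons_of_neg hd, List.dropWhile_cons_of_neg hd]

theorem wordColorsB_items : wordColorsB.items =
    kwLogical.map (fun w => (w, colLogical)) ++ (kwLoop.map (fun w => (w, colLoop)) ++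
    (kwControl.map (fun w => (w, colControl)) ++ kwCyber.map (fun w => (w, colCyber)))) := by
  set_option maxRecDepth 10000 in decide

theorem find?_map_const (ws : List (List Char)) (c k : List Char) :
    List.find? (fun p => p.1 == k) (ws.map fun w => (w, c)) =
      if k ∈ ws then some (k, c) else none := by
  induction ws with
  | nil => simp
  | cons w ws ih =>
    by_cases hw : w = k
    · subst hw; simp
    · simp [hw, ih, List.mem_cons, Ne.symm hw]

theorem disj_of_inter_nil {α : Type} [DecidableEq α] {l1 l2 : List α}
    (h : l1.inter l2 = []) {x : α} (h1 : x ∈ l1) (h2 : x ∈ l2) : False := by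
  have hx : x ∈ l1.inter l2 := List.mem_inter_iff.mpr ⟨h1, h2⟩
  rw [h] at hx
  simp at hx

theorem wordLookup (w : List Char) :
    PySem.Dict.get? wordColorsB w =
      (if w ∈ kwCyber then some colCyber
       else if w ∈ kwControl then some colControl
       else if w ∈ kwLoop then some colLoop
       else if w ∈ kwLogical then some colLogical
       else none) := by
  have dCyCo : kwCyber.inter kwControl = [] := by decide
  have dCyLp : kwCyber.inter kwLoop = [] := by decide
  have dCyLg : kwCyber.inter kwLogical = [] := by decide
  have dCoLp : kwControl.inter kwLoop = [] := by decide
  have dCoLg : kwControl.inter kwLogical = [] := by decide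
  have dLpLg : kwLoop.inter kwLogical = [] := by decide
  rw [PySem.Dict.get?, wordColorsB_items]
  simp only [List.find?_append, find?_map_const]
  by_cases h1 : w ∈ kwCyber <;> by_cases h2 : w ∈ kwControl <;>
    by_cases h3 : w ∈ kwLoop <;> by_cases h4 : w ∈ kwLogical <;>
  first
    | exact (disj_of_inter_nil dCyCo h1 h2).elim
    | exact (disj_of_inter_nil dCyLp h1 h3).elim
    | exact (disj_of_inter_nil dCyLg h1 h4).elim
    | exact (disj_of_inter_nil dCoLp h2 h3).elim
    | exact (disj_of_inter_nil dCoLg h2 h4).elim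
    | exact (disj_of_inter_nil dLpLg h3 h4).elim
    | simp [h1, h2, h3, h4]

theorem renderB_word (w : List Char) : renderB ("word", w) = wordColorA w := by
  simp only [renderB, wordLookup, wordColorA]
  split_ifs <;> rfl

theorem segAB : ∀ l : List Char, segA l = segB l := by
  intro l
  induction l using segA.induct with
  | case1 => simp [segA, segB, tokenizeB]
  | case2 c t h p ih =>
    have ih' : segA (t.dropWhile isWordCharB) = segB (t.dropWhile isWordCharB) := by
      simpa only [p, spanWordA_eq] using ih
    rw [segA.eq_def, segB, tokenizeB.eq_def]
    simp only [h, if_true, List.flatMap_cons, spanWordA_eq, renderB_word, ih', segB]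
  | case3 c t h1 h2 p ih =>
    rw [segA.eq_def, segB, tokenizeB.eq_def]
    simp only [h1, h2, if_true, Bool.false_eq_true, if_false]
    split
    · rename_i r2 heq
      rw [spanNumA_false_dot t r2 heq]
      have ih' : segA (r2.dropWhile PySem.Chars.isdigit) = segB (r2.dropWhile PySem.Chars.isdigit) := by
        simpa only [p, spanNumA_false_dot t r2 heq] using ih
      simp [renderB, ih', segB]
    · rename_i hno
      have hno' : ∀ r2, t.dropWhile PySem.Chars.isdigit ≠ '.' :: r2 := fun r2 h => hno r2 h
      rw [spanNumA_false_nodot t hno']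
      have ih' : segA (t.dropWhile PySem.Chars.isdigit) = segB (t.dropWhile PySem.Chars.isdigit) := by
        simpa only [p, spanNumA_false_nodot t hno'] using ih
      simp [renderB, ih', segB]
  | case4 c t h1 h2 h3 ih =>
    rw [segA.eq_def, segB, tokenizeB.eq_def]
    simp [h1, h2, h3, renderB, ih, segB]
  | case5 c t h1 h2 h3 ih =>
    rw [segA.eq_def, segB, tokenizeB.eq_def]
    simp [h1, h2, h3, renderB, ih, segB]

def tailRender : List Char → List Char → Bool → List Char
  | [], buf, _ => segA buf
  | c :: t, buf, inq =>
    if c = '"' then segA buf ++ '"' :: tailRender t [] (!inq)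
    else if inq then c :: tailRender t buf inq
    else tailRender t (buf ++ [c]) inq

theorem lineA_flatten : ∀ (l : List Char) (parts : List (List Char)) (buf : List Char) (inq : Bool),
    (lineA l parts buf inq).flatten = parts.flatten ++ tailRender l buf inq := by
  intro l
  induction l with
  | nil =>
    intro parts buf inq
    rcases buf with _ | ⟨b, bs⟩
    · simp [lineA, tailRender, segA]
    · simp [lineA, tailRender]
  | cons c t ih =>
    intro parts buf inq
    by_cases hq : c = '"'
    · subst hq
      rcases buf with _ | ⟨b, bs⟩ <;>
        simp [lineA, tailRender, ih, segA, List.append_assoc]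
    · by_cases hi : inq = true
      · simp [lineA, tailRender, hq, hi, ih, List.append_assoc]
      · simp at hi
        simp [lineA, tailRender, hq, hi, ih]

def splitSpec : List Char → List (List Char)
  | [] => [[]]
  | c :: t =>
    if c = '"' then [] :: splitSpec t
    else
      match splitSpec t with
      | p :: ps => (c :: p) :: ps
      | [] => [[c]]

def consPre (buf : List Char) : List (List Char) → List (List Char)
  | p :: ps => (buf ++ p) :: ps
  | [] => [buf]

theorem splitSpec_shape (l : List Char) : ∃ p ps, splitSpec l = p :: ps := by
  cases l with
  | nil => exact ⟨[], [], rfl⟩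
  | cons c t =>
    simp only [splitSpec]
    by_cases hq : c = '"'
    · exact ⟨[], splitSpec t, by simp [hq]⟩
    · rcases h : splitSpec t with _ | ⟨p, ps⟩
      · exact ⟨[c], [], by simp [hq]⟩
      · exact ⟨c :: p, ps, by simp [hq]⟩

theorem go_spec : ∀ (fuel : Nat) (l cur : List Char) (acc : List (List Char)),
    l.length < fuel →
    PySem.Chars.splitOn.go ['"'] fuel l cur acc = acc.reverse ++ consPre cur.reverse (splitSpec l) := by
  intro fuel
  induction fuel with
  | zero => intro l cur acc h; omega
  | succ fuel ih =>
    intro l cur acc h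
    rcases l with _ | ⟨c, t⟩
    · rw [PySem.Chars.splitOn.go]
      simp [splitSpec, consPre]
      omega
    · rw [PySem.Chars.splitOn.go]
      by_cases hq : c = '"'
      · subst hq
        have hpre : List.isPrefixOf ['"'] ('"' :: t) = true := by simp [List.isPrefixOf]
        simp only [hpre, if_true, List.length_cons, List.length_nil, List.drop_succ_cons, List.drop_zero]
        rw [ih t [] ((cur.reverse) :: acc) (by simpa using Nat.lt_of_succ_lt_succ h)]
        obtain ⟨p, ps, hsp⟩ := splitSpec_shape t
        simp [splitSpec, hsp, consPre]
      · have hpre : List.isPrefixOf ['"'] (c :: t) = false := by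
          simp [List.isPrefixOf, Ne.symm hq]
        simp only [hpre, Bool.false_eq_true, if_false]
        rw [ih t (c :: cur) acc (by simpa using Nat.lt_of_succ_lt_succ h)]
        obtain ⟨p, ps, hsp⟩ := splitSpec_shape t
        simp [splitSpec, hsp, consPre, hq]

theorem splitOn_eq (l : List Char) : PySem.Chars.splitOn l ['"'] = splitSpec l := by
  rw [PySem.Chars.splitOn, go_spec (l.length + 1) l [] [] (Nat.lt_succ_self _)]
  obtain ⟨p, ps, hsp⟩ := splitSpec_shape l
  simp [hsp, consPre]

def jn : Bool → List (List Char) → List Char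
  | _, [] => []
  | b, [p] => if b then segA p else p
  | b, p :: q :: ps => (if b then segA p else p) ++ '"' :: jn (!b) (q :: ps)

theorem tailRender_jn : ∀ (l buf : List Char),
    (tailRender l buf false = jn true (consPre buf (splitSpec l))) ∧
    (tailRender l [] true = jn false (splitSpec l)) := by
  intro l
  induction l with
  | nil =>
    intro buf
    constructor
    · simp [tailRender, splitSpec, consPre, jn]
    · simp [tailRender, splitSpec, jn, segA]
  | cons c t ih =>
    intro buf
    by_cases hq : c = '"'
    · subst hq
      obtain ⟨p, ps, hsp⟩ := splitSpec_shape t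
      constructor
      · rw [tailRender]
        simp only [Bool.not_false, (ih buf).2]
        simp [splitSpec, consPre, hsp, jn]
      · rw [tailRender]
        simp only [Bool.not_true, (ih []).1]
        simp [splitSpec, consPre, hsp, jn, segA]
    · obtain ⟨p, ps, hsp⟩ := splitSpec_shape t
      constructor
      · rw [tailRender]
        simp only [hq, if_false, Bool.false_eq_true, (ih (buf ++ [c])).1]
        rcases ps with _ | ⟨q, qs⟩ <;>
          simp [splitSpec, consPre, hsp, hq, jn]
      · rw [tailRender]
        simp only [hq, if_false, (ih []).2]
        rcases ps with _ | ⟨q, qs⟩ <;>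
          simp [splitSpec, consPre, hsp, hq, jn]

theorem join_enum : ∀ (ps : List (List Char)) (k : Int), 0 ≤ k →
    PySem.Chars.join ['"'] ((PySem.List.enumerate ps k).map
      (fun ip => if PySem.Int.mod ip.1 2 = 0 then segA ip.2 else ip.2)) =
    jn (decide (PySem.Int.mod k 2 = 0)) ps := by
  intro ps
  induction ps with
  | nil => intro k hk; simp [PySem.List.enumerate, jn, PySem.Chars.join, List.intercalate]
  | cons p ps ih =>
    intro k hk
    rcases ps with _ | ⟨q, qs⟩
    · simp only [PySem.List.enumerate, List.map_cons, List.map_nil]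
      rw [PySem.Chars.join_singleton]
      rcases h : decide (PySem.Int.mod k 2 = 0) with _ | _ <;> simp_all [jn]
    · simp only [PySem.List.enumerate, List.map_cons]
      have hrest : (if PySem.Int.mod (k + 1) 2 = 0 then segA q else q) ::
          List.map (fun ip => if PySem.Int.mod ip.1 2 = 0 then segA ip.2 else ip.2)
            (PySem.List.enumerate qs (k + 1 + 1)) =
          List.map (fun ip => if PySem.Int.mod ip.1 2 = 0 then segA ip.2 else ip.2)
            (PySem.List.enumerate (q :: qs) (k + 1)) := by
        simp [PySem.List.enumerate]
      rw [PySem.Chars.join_cons_cons, hrest, ih (k + 1) (by omega)]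
      have hpar : decide (PySem.Int.mod (k + 1) 2 = 0) = !decide (PySem.Int.mod k 2 = 0) := by
        rw [PySem.Int.mod_eq_emod_of_pos (b := 2) (by norm_num),
          PySem.Int.mod_eq_emod_of_pos (b := 2) (by norm_num)]
        by_cases h1 : (k + 1) % 2 = 0 <;> by_cases h2 : k % 2 = 0 <;> simp [h1, h2] <;> omega
      rw [hpar]
      by_cases hm : PySem.Int.mod k 2 = 0 <;> simp [jn, hm]


theorem main_eq2 (s : String) : colorize_line_py s = colorize_line_py_alt s := by
  rw [colorize_line_py, colorize_line_py_alt]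
  rw [lineA_flatten s.toList [] [] false]
  rw [(tailRender_jn s.toList []).1]
  rw [splitOn_eq]
  simp only [← segAB]
  rw [join_enum (splitSpec s.toList) 0 (by norm_num)]
  obtain ⟨p, ps, hsp⟩ := splitSpec_shape s.toList
  simp [hsp, consPre]

-- ===== VERDICT (by name: the statement is the Claim_ definition above) =====
theorem colorize_line_py_spec : Claim_equal_colorize_line_py := by
  intro s _hdom
  unfold Spec_colorize_line_py
  exact main_eq2 s
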